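-- pv_equiv track=rewrite | github.com/chokwonsik/algorithm | Programmers/LV_0/프로그래머스(181932)_코드처리하기.py | solution
-- ===== SOURCE A (Python) =====
-- def solution(code):
--     answer = []
--     mode = False  # 처음에는 mode가 False로 시작 (mode 0)
--
--     for idx, char in enumerate(code):
--         if char == "1":  # 현재 문자가 "1"이면 mode를 전환
--             mode = not mode
--         else:
--             if mode:  # mode 1일 때
--                 if idx % 2 == 1:  # 홀수 인덱스일 때만 추가
--                     answer.append(char)
--             else:  # mode 0일 때
--                 if idx % 2 == 0:  # 짝수 인덱스일 때만 추가
--                     answer.append(char)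
--
--     # answer가 비어있으면 "EMPTY", 아니면 리스트를 문자열로 변환하여 반환
--     return ''.join(answer) if answer else "EMPTY"
-- ===== SOURCE B (Python) =====
-- def solution(code):
--     # table-first: prefix parity of '1's strictly before each index, then filter
--     par = []
--     p = 0
--     for c in code:
--         par.append(p)
--         p ^= (c == "1")
--     kept = [c for i, c in enumerate(code) if c != "1" and par[i] % 2 == i % 2]
--     return ''.join(kept) if kept else "EMPTY"
-- ===== Notes on version B (the rewrite author's own statement) =====
-- stated objective: alternative
-- what changed: Replaces the single stateful toggle loop with a two-phase decomposition: first build a prefix-parity table of '1' counts, then keep characters in a separate filtering comprehension comparing table parity against index parity.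
import Mathlib
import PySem

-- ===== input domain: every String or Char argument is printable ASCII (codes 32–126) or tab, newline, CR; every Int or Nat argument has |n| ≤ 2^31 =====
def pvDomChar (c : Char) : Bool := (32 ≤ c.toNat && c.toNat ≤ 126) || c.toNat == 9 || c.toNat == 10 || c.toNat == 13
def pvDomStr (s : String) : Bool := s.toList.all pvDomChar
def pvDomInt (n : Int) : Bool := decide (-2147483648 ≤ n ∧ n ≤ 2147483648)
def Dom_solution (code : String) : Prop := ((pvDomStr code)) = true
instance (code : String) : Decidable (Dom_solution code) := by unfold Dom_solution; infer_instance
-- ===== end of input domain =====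

-- B changes the decomposition only (same O(n) cost): a prefix-parity table then a filter, instead of A's stateful toggle loop.

-- ===== PORT A =====
def solAStep (st : List Char × Bool) (p : Int × Char) : List Char × Bool :=
  if p.2 = '1' then (st.1, !st.2)
  else if st.2 then
    (if PySem.Int.mod p.1 2 = 1 then (st.1 ++ [p.2], st.2) else st)
  else
    (if PySem.Int.mod p.1 2 = 0 then (st.1 ++ [p.2], st.2) else st)

def solution (code : String) : String :=
  let st := (PySem.List.enumerate code.toList).foldl solAStep ([], false)
  if st.1 = [] then "EMPTY" else String.ofList st.1

-- ===== PORT B =====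
def solBPref (st : List Int × Int) (c : Char) : List Int × Int :=
  (st.1 ++ [st.2], PySem.Int.bxor st.2 (if c = '1' then 1 else 0))

-- par[i] is an in-range Python index here; pyGet? is exact (none = IndexError, unreachable)
def solBTest (par : List Int) (i : Int) : Bool :=
  match PySem.List.pyGet? par i with
  | some v => PySem.Int.mod v 2 == PySem.Int.mod i 2
  | none => false

def solution_alt (code : String) : String :=
  let par := (code.toList.foldl solBPref ([], 0)).1
  let kept := ((PySem.List.enumerate code.toList).filter
      (fun q => q.2 != '1' && solBTest par q.1)).map (·.2)
  if kept = [] then "EMPTY" else String.ofList kept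

-- ===== PRECONDITION & SPEC =====
def Spec_solution (code : String) (out : String) : Prop := out = solution_alt code
instance (code : String) (out : String) : Decidable (Spec_solution code out) := by unfold Spec_solution; infer_instance

-- ===== CLAIM (what is proved, stated in full; the proofs are below) =====
def Claim_equal_solution : Prop := ∀ (code : String), Dom_solution code → Spec_solution code (solution code)

-- ===== LEMMAS AND PROOFS =====

/-- the common value: characters kept when scanning `l` from index `idx` with toggle `mode` -/
def solGo : List Char → Int → Bool → List Char
  | [], _, _ => []
  | c :: t, idx, mode =>
    if c = '1' then solGo t (idx + 1) (!mode)
    else if (if mode then PySem.Int.mod idx 2 = 1 else PySem.Int.mod idx 2 = 0)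
      then c :: solGo t (idx + 1) mode
      else solGo t (idx + 1) mode

/-- the prefix-parity table built by B's first loop -/
def solPref : List Char → Int → List Int
  | [], _ => []
  | c :: t, p => p :: solPref t (PySem.Int.bxor p (if c = '1' then 1 else 0))

theorem solA_fold (l : List Char) : ∀ (s : Int) (acc : List Char) (mode : Bool),
    ((PySem.List.enumerate l s).foldl solAStep (acc, mode)).1 = acc ++ solGo l s mode := by
  induction l with
  | nil => intro s acc mode; simp [PySem.List.enumerate, solGo]
  | cons c t ih =>
    intro s acc mode
    rw [PySem.List.enumerate_cons]
    simp only [List.foldl_cons, solAStep, solGo]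
    by_cases h1 : c = '1'
    · simp [h1, ih]
    · cases mode <;> simp only [h1, if_false, Bool.false_eq_true, if_true] <;> split_ifs with h2 <;>
        simp [ih]

theorem solB_pref (l : List Char) : ∀ (acc : List Int) (p : Int),
    (l.foldl solBPref (acc, p)).1 = acc ++ solPref l p := by
  induction l with
  | nil => intro acc p; simp [solPref]
  | cons c t ih => intro acc p; simp [solBPref, solPref, ih]

theorem solB_filter (l : List Char) : ∀ (pre : List Int) (p : Int), p = 0 ∨ p = 1 →
    ((PySem.List.enumerate l (pre.length : Int)).filter
        (fun q => q.2 != '1' && solBTest (pre ++ solPref l p) q.1)).map (·.2)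
      = solGo l (pre.length : Int) (p = 1) := by
  induction l with
  | nil => intro pre p _; simp [PySem.List.enumerate, solGo]
  | cons c t ih =>
    intro pre p hp
    rw [PySem.List.enumerate_cons]
    have hpar : pre ++ solPref (c :: t) p
        = (pre ++ [p]) ++ solPref t (PySem.Int.bxor p (if c = '1' then 1 else 0)) := by
      simp [solPref]
    have hp' : PySem.Int.bxor p (if c = '1' then 1 else 0) = 0
        ∨ PySem.Int.bxor p (if c = '1' then 1 else 0) = 1 := by
      rcases hp with h | h <;> subst h <;> by_cases hc : c = '1' <;>
        simp [hc, PySem.Int.bxor]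
    have hrec := ih (pre ++ [p]) _ hp'
    rw [← hpar] at hrec
    have hlen : (((pre ++ [p]).length : Nat) : Int) = (pre.length : Int) + 1 := by
      simp
    rw [hlen] at hrec
    by_cases hc : c = '1'
    · subst hc
      have hmode : decide (PySem.Int.bxor p (if ('1' : Char) = '1' then 1 else 0) = 1)
          = !decide (p = 1) := by
        rcases hp with h | h <;> subst h <;> decide
      rw [hmode] at hrec
      simp only [List.filter_cons, bne_self_eq_false, Bool.false_and, solGo]
      exact hrec
    · have hmid : solBTest (pre ++ solPref (c :: t) p) (pre.length : Int)
          = (PySem.Int.mod p 2 == PySem.Int.mod (pre.length : Int) 2) := by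
        simp [solBTest, solPref]
      have hb : PySem.Int.bxor p (if c = '1' then 1 else 0) = p := by simp [hc]
      rw [hb] at hrec
      have hp2 : PySem.Int.mod p 2 = p := by rcases hp with h | h <;> subst h <;> decide
      have hm2 : PySem.Int.mod (pre.length : Int) 2 = 0
          ∨ PySem.Int.mod (pre.length : Int) 2 = 1 := by
        have h1 := PySem.Int.mod_nonneg (pre.length : Int) (b := 2) (by norm_num)
        have h2 := PySem.Int.mod_lt (pre.length : Int) (b := 2) (by norm_num)
        omega
      rw [PySem.Int.mod_eq_emod_of_pos (by norm_num)] at hmid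
      rw [PySem.Int.mod_eq_emod_of_pos (by norm_num)] at hm2
      rcases hp with h | h <;> subst h <;> rcases hm2 with h2 | h2 <;>
        simp [hmid, h2, hc, solGo, hrec, PySem.Int.mod_eq_emod_of_pos]

-- ===== VERDICT (by name: the statement is the Claim_ definition above) =====
theorem solution_spec : Claim_equal_solution := by
  intro code _
  unfold Spec_solution solution solution_alt
  have hA := solA_fold code.toList 0 [] false
  have hB := solB_filter code.toList [] 0 (Or.inl rfl)
  simp only [List.length_nil, Int.natCast_zero, List.nil_append,
    show (decide ((0 : Int) = 1)) = false from rfl] at hB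
  simp only [solB_pref, List.nil_append, hA, hB]
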